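-- pv_equiv track=rewrite | github.com/Traps/aoc-2025-py | src/aoc2025/solutions/day02b.py | validate_id
-- ===== SOURCE A (Python) =====
-- def validate_id(id_number:int) -> bool:
--     id_digits = str(id_number)
--     id_length = len(id_digits)
--
--     min_segment_size = len(set(id_digits))
--
--     for segment_size in range(min_segment_size, id_length // 2 + 1):
--         if id_length % segment_size != 0:
--             continue
--
--         if id_digits.startswith(id_digits[segment_size:]):
--             return False
--
--     return True
-- ===== SOURCE B (Python) =====
-- def validate_id(id_number: int) -> bool:
--     s = str(id_number)
--     return (s + s).find(s, 1) == len(s)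
-- ===== Notes on version B (the rewrite author's own statement) =====
-- stated objective: idiomatic
-- what changed: Replaced the divisor-enumeration loop (distinct-digit lower bound, modulus filter, startswith period checks) by the doubled-string primitivity test: (s+s).find(s, 1) == len(s).
import Mathlib
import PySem

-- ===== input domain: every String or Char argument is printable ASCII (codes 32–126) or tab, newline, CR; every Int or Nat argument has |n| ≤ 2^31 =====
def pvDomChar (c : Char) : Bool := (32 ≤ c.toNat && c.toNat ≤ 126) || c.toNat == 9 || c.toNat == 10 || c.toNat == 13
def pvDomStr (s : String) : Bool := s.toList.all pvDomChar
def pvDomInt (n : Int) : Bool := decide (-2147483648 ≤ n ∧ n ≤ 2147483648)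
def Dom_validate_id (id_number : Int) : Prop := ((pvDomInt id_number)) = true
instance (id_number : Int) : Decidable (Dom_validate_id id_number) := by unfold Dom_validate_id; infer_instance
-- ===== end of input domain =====

-- B replaces A's divisor-enumeration/startswith scan by the doubled-string minimal-rotation
-- test (s+s).find(s, 1) == len(s); alternative algorithm, same exact return value.

-- ===== PORT A =====
def validate_id (id_number : Int) : Bool :=
  let id_digits := PySem.Int.toChars id_number
  let id_length : Int := (id_digits.length : Int)
  let min_segment_size : Int := ((PySem.Set.ofList id_digits).length : Int)
  -- the for-loop: `continue` unless segment_size divides, early `return False`, else `return True`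
  !((PySem.List.pyRange min_segment_size (PySem.Int.floordiv id_length 2 + 1) 1).any
      (fun segment_size =>
        PySem.Int.mod id_length segment_size == 0 &&
        PySem.Chars.startswith id_digits (PySem.Chars.slice id_digits (some segment_size) none)))

-- ===== PORT B =====
def validate_id_alt (id_number : Int) : Bool :=
  let s := PySem.Int.toChars id_number
  PySem.Chars.findFrom (s ++ s) s 1 none == (s.length : Int)

-- ===== PRECONDITION & SPEC =====
def Spec_validate_id (id_number : Int) (out : Bool) : Prop := out = validate_id_alt id_number
instance (id_number : Int) (out : Bool) : Decidable (Spec_validate_id id_number out) := by unfold Spec_validate_id; infer_instance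

-- ===== CLAIM (what is proved, stated in full; the proofs are below) =====
def Claim_equal_validate_id : Prop := ∀ (id_number : Int), Dom_validate_id id_number → Spec_validate_id id_number (validate_id id_number)

-- ===== LEMMAS AND PROOFS =====

-- str(n) is never empty
theorem pvToDigitsCore_len (b f n : Nat) (acc : List Char) :
    acc.length ≤ (Nat.toDigitsCore b f n acc).length := by
  induction f generalizing n acc with
  | zero => simp [Nat.toDigitsCore]
  | succ f ih =>
    simp only [Nat.toDigitsCore]
    split
    · simp
    · exact le_trans (by simp) (ih _ _)

theorem pvToChars_len (z : Int) : 0 < (PySem.Int.toChars z).length := by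
  unfold PySem.Int.toChars
  split
  · simp
  · unfold Nat.toDigits
    simp only [Nat.toDigitsCore]
    split
    · simp
    · have := pvToDigitsCore_len 10 z.toNat (z.toNat / 10) [Nat.digitChar (z.toNat % 10)]
      simpa using lt_of_lt_of_le (by simp) this

-- getD computation rules (total, proof-free indices)
theorem pvDropD (s : List Char) (k i : Nat) : (s.drop k).getD i 'a' = s.getD (k + i) 'a' := by
  simp [List.getD_eq_getElem?_getD, List.getElem?_drop]

theorem pvTakeD (s : List Char) (k i : Nat) (h : i < k) :
    (s.take k).getD i 'a' = s.getD i 'a' := by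
  simp [List.getD_eq_getElem?_getD, h]

theorem pvAppLeftD (l₁ l₂ : List Char) (i : Nat) (h : i < l₁.length) :
    (l₁ ++ l₂).getD i 'a' = l₁.getD i 'a' := by
  simp [List.getD_eq_getElem?_getD, List.getElem?_append, h]

theorem pvAppRightD (l₁ l₂ : List Char) (i : Nat) (h : l₁.length ≤ i) :
    (l₁ ++ l₂).getD i 'a' = l₂.getD (i - l₁.length) 'a' := by
  simp [List.getD_eq_getElem?_getD, List.getElem?_append_right, h]

theorem pvListEq_iff (l₁ l₂ : List Char) (h : l₁.length = l₂.length) :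
    l₁ = l₂ ↔ ∀ i < l₁.length, l₁.getD i 'a' = l₂.getD i 'a' := by
  constructor
  · intro he i _; rw [he]
  · intro hi
    apply List.ext_getElem h
    intro i h1 h2
    have := hi i h1
    rwa [List.getD_eq_getElem _ _ h1, List.getD_eq_getElem _ _ h2] at this

theorem pvPrefix_iff (l₁ l₂ : List Char) (hl : l₁.length ≤ l₂.length) :
    l₁ <+: l₂ ↔ ∀ i < l₁.length, l₁.getD i 'a' = l₂.getD i 'a' := by
  rw [List.prefix_iff_eq_take]
  constructor
  · intro he i hi
    rw [he]; simp [List.getD_eq_getElem?_getD, hi]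
  · intro hi
    apply List.ext_getElem (by simp [hl])
    intro i h1 h2
    have := hi i h1
    rw [List.getD_eq_getElem _ _ h1, List.getD_eq_getElem _ _ (by omega : i < l₂.length)] at this
    rw [this, List.getElem_take]

-- cyclic view of s : pvF s i reads s at index i mod |s|
def pvF (s : List Char) (i : Nat) : Char := s.getD (i % s.length) 'a'

-- "rotation by j fixes s", expressed on all indices
def pvGood (s : List Char) (j : Nat) : Prop := ∀ i : Nat, pvF s (i + j) = pvF s i

-- period k as an index-wise statement
theorem pvPeriod_iff (s : List Char) (k : Nat) (hk : k ≤ s.length) :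
    s.drop k <+: s ↔ ∀ i, i + k < s.length → s.getD (i + k) 'a' = s.getD i 'a' := by
  rw [pvPrefix_iff _ _ (by simp)]
  constructor
  · intro h i hi
    have := h i (by simp; omega)
    rw [pvDropD, Nat.add_comm k i] at this
    exact this
  · intro h i hi
    simp only [List.length_drop] at hi
    rw [pvDropD, Nat.add_comm k i]
    exact h i (by omega)

-- rotation by j as an index-wise statement
theorem pvRot_iff (s : List Char) (j : Nat) (hn : 0 < s.length) (hj : j ≤ s.length) :
    s.drop j ++ s.take j = s ↔
      ∀ i < s.length, s.getD ((i + j) % s.length) 'a' = s.getD i 'a' := by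
  have hlen : (s.drop j ++ s.take j).length = s.length := by simp; omega
  have key : ∀ i, i < s.length →
      (s.drop j ++ s.take j).getD i 'a' = s.getD ((i + j) % s.length) 'a' := by
    intro i hi
    by_cases hc : i < s.length - j
    · rw [pvAppLeftD _ _ _ (by simp; omega), pvDropD,
        Nat.mod_eq_of_lt (by omega), Nat.add_comm i j]
    · rw [pvAppRightD _ _ _ (by simp; omega), pvTakeD _ _ _ (by simp; omega)]
      rw [Nat.mod_eq_sub_mod (by omega), Nat.mod_eq_of_lt (by omega)]
      congr 1
      simp
      omega
  rw [pvListEq_iff _ _ hlen, hlen]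
  exact forall_congr' fun i => imp_congr_right fun hi => by rw [key i hi]

theorem pvRot_iff_good (s : List Char) (j : Nat) (hn : 0 < s.length) (hj : j ≤ s.length) :
    s.drop j ++ s.take j = s ↔ pvGood s j := by
  rw [pvRot_iff s j hn hj]
  constructor
  · intro h i
    unfold pvF
    rw [← Nat.mod_add_mod]
    rw [h (i % s.length) (Nat.mod_lt _ hn)]
  · intro h i hi
    have := h i
    unfold pvF at this
    rwa [Nat.mod_eq_of_lt hi] at this

theorem pvGood_len (s : List Char) : pvGood s s.length := by
  intro i; simp [pvF]

theorem pvGood_add (s : List Char) {a b : Nat} (ha : pvGood s a) (hb : pvGood s b) :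
    pvGood s (a + b) := by
  intro i; rw [← Nat.add_assoc, pvGood] at *; rw [hb, ha]

theorem pvGood_mul (s : List Char) {j : Nat} (t : Nat) (hj : pvGood s j) : pvGood s (t * j) := by
  induction t with
  | zero => intro i; simp
  | succ t ih => simpa [Nat.succ_mul] using pvGood_add s ih hj

theorem pvGood_gcd (s : List Char) {j : Nat} (hn : 0 < s.length) (hj0 : 0 < j)
    (hjn : j < s.length) (hj : pvGood s j) : pvGood s (Nat.gcd j s.length) := by
  set n := s.length with hns
  set g := Nat.gcd j n with hg
  have hgj : g ≤ j := Nat.gcd_le_left _ hj0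
  have hBez := Nat.gcd_eq_gcd_ab j n
  set u := Nat.gcdA j n
  set v := Nat.gcdB j n
  -- a := u mod n ≥ 0, and (j * a) % n = g in ℕ
  have hnpos : (0:Int) < (n:Int) := by exact_mod_cast hn
  set a : Nat := (u % (n:Int)).toNat with ha
  have haInt : (a : Int) = u % (n:Int) := Int.toNat_of_nonneg (Int.emod_nonneg u (by omega))
  have hkeyInt : ((j:Int) * a) % n = (g:Int) := by
    rw [haInt]
    have h1 : ((j:Int) * (u % n)) % n = ((j:Int) * u) % n := by
      conv_lhs => rw [Int.mul_emod]
      conv_rhs => rw [Int.mul_emod]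
      rw [Int.emod_emod_of_dvd _ (dvd_refl _)]
    rw [h1]
    have h2 : (j:Int) * u = (g:Int) - n * v := by rw [hBez]; ring
    rw [h2, Int.sub_mul_emod_self_left]
    exact Int.emod_eq_of_lt (by exact_mod_cast Nat.zero_le g) (by exact_mod_cast lt_of_le_of_lt hgj hjn)
  have hkey : (j * a) % n = g := by exact_mod_cast hkeyInt
  -- so j * a = n * w + g for w := (j*a)/n
  set w : Nat := (j * a) / n with hw
  have hsplit := Nat.div_add_mod (j * a) n
  rw [hkey, ← hw] at hsplit
  -- Good g from Good (a*j) and Good (w*n)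
  have hGa : pvGood s (a * j) := pvGood_mul s a hj
  have hGw : pvGood s (w * n) := pvGood_mul s w (pvGood_len s)
  intro i
  have e1 : pvF s (i + g + w * n) = pvF s (i + g) := hGw (i + g)
  have e2 : i + g + w * n = i + a * j := by
    rw [mul_comm a j, mul_comm w n]
    omega
  rw [← e1, e2, hGa i]

theorem pvGood_period (s : List Char) {g : Nat} (hg : pvGood s g) :
    ∀ i, i + g < s.length → s.getD (i + g) 'a' = s.getD i 'a' := by
  intro i hi
  have := hg i
  unfold pvF at this
  rwa [Nat.mod_eq_of_lt hi, Nat.mod_eq_of_lt (by omega)] at this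

theorem pvPeriod_step (s : List Char) {k : Nat} (hk0 : 0 < k)
    (hper : ∀ i, i + k < s.length → s.getD (i + k) 'a' = s.getD i 'a') :
    ∀ i < s.length, s.getD i 'a' = s.getD (i % k) 'a' := by
  intro i
  induction i using Nat.strong_induction_on with
  | _ i ih =>
    intro hi
    by_cases hik : i < k
    · rw [Nat.mod_eq_of_lt hik]
    · have h1 : (i - k) + k = i := by omega
      have h2 := hper (i - k) (by omega)
      rw [h1] at h2
      rw [Nat.mod_eq_sub_mod (by omega : i ≥ k), h2]
      exact ih (i - k) (by omega) (by omega)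

theorem pvPeriod_good (s : List Char) {k : Nat} (hn : 0 < s.length) (hk0 : 0 < k)
    (hdvd : k ∣ s.length)
    (hper : ∀ i, i + k < s.length → s.getD (i + k) 'a' = s.getD i 'a') : pvGood s k := by
  intro i
  unfold pvF
  rw [pvPeriod_step s hk0 hper ((i + k) % s.length) (Nat.mod_lt _ hn),
      pvPeriod_step s hk0 hper (i % s.length) (Nat.mod_lt _ hn)]
  rw [Nat.mod_mod_of_dvd _ hdvd, Nat.mod_mod_of_dvd _ hdvd, Nat.add_mod_right]

-- a nodup list contained in another is no longer than it
theorem pvNodup_len_le (l l' : List Char) (h : l.Nodup) (hs : ∀ x ∈ l, x ∈ l') :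
    l.length ≤ l'.length := by
  classical
  calc l.length = l.toFinset.card := (List.toFinset_card_of_nodup h).symm
  _ ≤ l'.toFinset.card := Finset.card_le_card (by intro x hx; simp at hx ⊢; exact hs x hx)
  _ ≤ l'.length := List.toFinset_card_le l'

theorem pvDistinct_le (s : List Char) {k : Nat} (_hn : 0 < s.length) (hk0 : 0 < k)
    (hk : k ≤ s.length)
    (hper : ∀ i, i + k < s.length → s.getD (i + k) 'a' = s.getD i 'a') :
    (PySem.Set.ofList s).length ≤ k := by
  have hsub : ∀ x ∈ s, x ∈ s.take k := by
    intro x hx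
    obtain ⟨i, hi, he⟩ := List.getElem_of_mem hx
    have hD : s.getD i 'a' = x := by rw [List.getD_eq_getElem _ _ hi, he]
    have := pvPeriod_step s hk0 hper i hi
    have hik : i % k < k := Nat.mod_lt _ hk0
    have hmem : s.getD (i % k) 'a' ∈ s.take k := by
      rw [← pvTakeD s k _ hik]
      rw [List.getD_eq_getElem _ _ (by simp; omega)]
      exact List.getElem_mem _
    rw [← hD, this]
    exact hmem
  have := pvNodup_len_le (PySem.Set.ofList s) (s.take k) (PySem.Set.nodup_ofList s)
    (fun x hx => hsub x ((PySem.Set.mem_ofList s x).mp hx))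
  simpa [Nat.min_eq_left hk] using this

-- occurrence of s in s++s at shift j ≤ |s| is exactly rotation by j
theorem pvOcc_iff_rot (s : List Char) (j : Nat) (hj : j ≤ s.length) :
    s <+: (s ++ s).drop j ↔ s.drop j ++ s.take j = s := by
  rw [List.drop_append_of_le_length hj, List.prefix_iff_eq_take]
  have ht : (s.drop j ++ s).take s.length = s.drop j ++ s.take j := by
    rw [List.take_append, List.take_of_length_le (by simp),
      show s.length - (s.drop j).length = j by simp only [List.length_drop]; omega]
  rw [ht]
  exact ⟨fun h => h.symm, fun h => h.symm⟩

-- A returns false iff some divisor period in A's scanned range exists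
theorem pvA_false_iff (z : Int) :
    validate_id z = false ↔
      ∃ k : Nat, (PySem.Set.ofList (PySem.Int.toChars z)).length ≤ k ∧
        k ≤ (PySem.Int.toChars z).length / 2 ∧ k ∣ (PySem.Int.toChars z).length ∧
        (PySem.Int.toChars z).drop k <+: PySem.Int.toChars z := by
  unfold validate_id
  set s := PySem.Int.toChars z with hs
  simp only [Bool.not_eq_false', List.any_eq_true]
  rw [show PySem.Int.floordiv ((s.length : Nat) : Int) 2 = ((s.length / 2 : Nat) : Int) from
    by exact_mod_cast PySem.Int.floordiv_natCast s.length 2]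
  constructor
  · rintro ⟨x, hxmem, hx⟩
    rw [PySem.List.mem_pyRange_one] at hxmem
    obtain ⟨hx1, hx2⟩ := hxmem
    rw [Bool.and_eq_true, beq_iff_eq, PySem.Int.mod_eq_zero_iff_dvd,
        PySem.Chars.startswith_iff, PySem.Chars.slice_eq_listSlice,
        PySem.List.slice_from _ (by omega : (0:Int) ≤ x)] at hx
    obtain ⟨hxd, hxp⟩ := hx
    refine ⟨x.toNat, by omega, by omega, ?_, hxp⟩
    have : ((x.toNat : Int)) ∣ (s.length : Int) := by
      rwa [Int.toNat_of_nonneg (by omega : (0:Int) ≤ x)]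
    exact_mod_cast this
  · rintro ⟨k, hk1, hk2, hk3, hk4⟩
    refine ⟨(k : Int), ?_, ?_⟩
    · rw [PySem.List.mem_pyRange_one]
      constructor <;> [exact_mod_cast hk1; (push_cast; omega)]
    · rw [Bool.and_eq_true, beq_iff_eq, PySem.Int.mod_eq_zero_iff_dvd,
        PySem.Chars.startswith_iff, PySem.Chars.slice_eq_listSlice,
        PySem.List.slice_from _ (by positivity : (0:Int) ≤ (k:Int))]
      refine ⟨by exact_mod_cast hk3, ?_⟩
      simpa using hk4

-- B returns false iff some proper rotation fixes s
theorem pvB_false_iff (z : Int) :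
    validate_id_alt z = false ↔
      ∃ j : Nat, 1 ≤ j ∧ j < (PySem.Int.toChars z).length ∧
        (PySem.Int.toChars z).drop j ++ (PySem.Int.toChars z).take j = PySem.Int.toChars z := by
  unfold validate_id_alt
  set s := PySem.Int.toChars z with hs
  set n := s.length with hn
  have hnp : 0 < n := pvToChars_len z
  have hk1 : (1:Nat) ≤ (s ++ s).length := by simp; omega
  set f := PySem.Chars.findFrom (s ++ s) s (1:Int) none with hf
  have hfcast : f = PySem.Chars.findFrom (s ++ s) s ((1:Nat):Int) none := by
    rw [hf]; norm_num
  have hocc_n : s <+: (s ++ s).drop n := by rw [hn, List.drop_left]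
  have hne : f ≠ -1 := by
    rw [hfcast, Ne, PySem.Chars.findFrom_natCast_eq_neg_one_iff _ _ 1 hk1]
    rw [show (s ++ s).drop 1 = s.drop 1 ++ s from List.drop_append_of_le_length (by omega)]
    exact not_not_intro (List.suffix_append (s.drop 1) s).isInfix
  obtain ⟨hf1, hf2, hf3⟩ := PySem.Chars.findFrom_natCast_spec (s ++ s) s 1 hk1 (hfcast ▸ hne)
  rw [← hfcast] at hf1 hf2 hf3
  have hf0 : (0:Int) ≤ f := le_trans (by norm_num) hf1
  have hfn : f.toNat ≤ n := by
    by_contra hgt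
    exact hf3 n (by omega) (by omega) hocc_n
  constructor
  · intro h
    rw [beq_eq_false_iff_ne] at h
    refine ⟨f.toNat, by omega, by omega, ?_⟩
    exact (pvOcc_iff_rot s f.toNat (by omega)).mp hf2
  · rintro ⟨j, hj1, hj2, hj3⟩
    rw [beq_eq_false_iff_ne]
    have hocc : s <+: (s ++ s).drop j := (pvOcc_iff_rot s j (by omega)).mpr hj3
    have : f.toNat ≤ j := by
      by_contra hgt
      exact hf3 j hj1 (by omega) hocc
    omega

-- ===== VERDICT (by name: the statement is the Claim_ definition above) =====
theorem validate_id_spec : Claim_equal_validate_id := by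
  intro z _
  unfold Spec_validate_id
  set s := PySem.Int.toChars z with hs
  set n := s.length with hn
  have hnp : 0 < n := pvToChars_len z
  have hmp : 0 < (PySem.Set.ofList s).length := by
    have : s ≠ [] := by intro h; rw [h] at hn; simp [hn] at hnp
    obtain ⟨c, hc⟩ := List.exists_mem_of_ne_nil s this
    have : c ∈ PySem.Set.ofList s := (PySem.Set.mem_ofList s c).mpr hc
    exact List.length_pos_of_mem this
  have hiff : validate_id z = false ↔ validate_id_alt z = false := by
    rw [pvA_false_iff, pvB_false_iff, ← hs, ← hn]
    constructor
    · rintro ⟨k, hk1, hk2, hk3, hk4⟩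
      refine ⟨k, by omega, by omega, ?_⟩
      have hkn : k ≤ n := le_trans hk2 (Nat.div_le_self _ _)
      exact (pvRot_iff_good s k hnp hkn).mpr
        (pvPeriod_good s hnp (by omega) hk3 ((pvPeriod_iff s k hkn).mp hk4))
    · rintro ⟨j, hj1, hj2, hj3⟩
      have hGj : pvGood s j := (pvRot_iff_good s j hnp (by omega)).mp hj3
      set g := Nat.gcd j n with hg
      have hGg : pvGood s g := pvGood_gcd s hnp (by omega) hj2 hGj
      have hgd : g ∣ n := Nat.gcd_dvd_right j n
      have hg0 : 0 < g := Nat.gcd_pos_of_pos_left n (by omega)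
      have hgj : g ≤ j := Nat.gcd_le_left n (by omega)
      have hg2 : g ≤ n / 2 := by
        rw [Nat.le_div_iff_mul_le (by omega)]
        obtain ⟨t, ht⟩ := hgd
        have : 2 ≤ t := by
          rcases Nat.lt_or_ge t 2 with h | h
          · interval_cases t <;> omega
          · exact h
        calc g * 2 ≤ g * t := Nat.mul_le_mul_left g this
        _ = n := ht.symm
      have hper := pvGood_period s hGg
      refine ⟨g, ?_, hg2, hgd, (pvPeriod_iff s g (by omega)).mpr hper⟩
      exact pvDistinct_le s hnp hg0 (by omega) hper
  cases hA : validate_id z <;> cases hB : validate_id_alt z <;> simp_all
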